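-- pv_equiv track=rewrite | github.com/Textualize/rich | rich/_tools.py | iter_first
-- ===== SOURCE A (Python) =====
-- from typing import Iterable, List, Tuple, TypeVar
--
-- T = TypeVar("T")
--
-- def iter_first(values: Iterable[T]) -> Iterable[Tuple[bool, T]]:
--     """Iterate and generate a tuple with a flag for first value."""
--     iter_values = iter(values)
--     try:
--         value = next(iter_values)
--     except StopIteration:
--         return
--     yield True, value
--     for value in iter_values:
--         yield False, value
-- ===== SOURCE B (Python) =====
-- def iter_first(values):
--     """Iterate and generate a tuple with a flag for first value.
--
--     Staged construction: materialize the values, build a parallel list of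
--     flags (True then Falses), and zip the two lists together.
--     Note: unlike A's lazy generator, this consumes the iterable eagerly.
--     """
--     vals = list(values)
--     flags = [True] + [False] * (len(vals) - 1)
--     return zip(flags, vals)
-- ===== Notes on version B (the rewrite author's own statement) =====
-- stated objective: alternative
-- what changed: Replaces A's lazy head-pull generator with a staged construction: materialize the values, build a parallel flag list [True, False, ..., False], and zip the two lists (eager, so laziness of the generator is traded away; return value is identical).
import Mathlib
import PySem

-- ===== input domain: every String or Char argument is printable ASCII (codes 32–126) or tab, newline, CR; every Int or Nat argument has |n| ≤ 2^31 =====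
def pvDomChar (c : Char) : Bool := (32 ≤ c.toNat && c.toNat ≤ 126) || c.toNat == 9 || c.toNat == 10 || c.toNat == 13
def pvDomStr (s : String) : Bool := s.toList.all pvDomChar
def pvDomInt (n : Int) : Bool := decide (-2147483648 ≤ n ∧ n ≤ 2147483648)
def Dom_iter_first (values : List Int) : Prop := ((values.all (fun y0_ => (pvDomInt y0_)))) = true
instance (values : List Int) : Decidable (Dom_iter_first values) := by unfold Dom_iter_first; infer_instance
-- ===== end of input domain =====

-- B builds a parallel flag list and zips; A pulls the head then maps the tail. Return values equal; B is eager where A is a generator.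
-- ===== PORT A =====
-- head is pulled first (next()/StopIteration), then the remaining values are yielded with False
def iter_first (values : List Int) : List (Bool × Int) :=
  match values with
  | [] => []
  | value :: rest => (true, value) :: rest.map (fun v => (false, v))

-- ===== PORT B =====
-- staged: flags = [True] + [False]*(len-1); zip flags vals (zip truncates to the shorter list)
def iter_first_alt (values : List Int) : List (Bool × Int) :=
  let flags := [true] ++ List.replicate (values.length - 1) false
  flags.zip values

-- ===== PRECONDITION & SPEC =====
def Spec_iter_first (values : List Int) (out : List (Bool × Int)) : Prop := out = iter_first_alt values
instance (values : List Int) (out : List (Bool × Int)) : Decidable (Spec_iter_first values out) := by unfold Spec_iter_first; infer_instance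

-- ===== CLAIM =====
def Claim_equal_iter_first : Prop := ∀ (values : List Int), Dom_iter_first values → Spec_iter_first values (iter_first values)

-- ===== LEMMAS AND PROOFS =====
theorem zip_replicate_false (xs : List Int) :
    (List.replicate xs.length false).zip xs = xs.map (fun v => (false, v)) := by
  induction xs with
  | nil => rfl
  | cons x xs ih => simp [List.replicate, ih]

-- ===== VERDICT =====
theorem iter_first_spec : Claim_equal_iter_first := by
  intro values _
  unfold Spec_iter_first iter_first iter_first_alt
  cases values with
  | nil => rfl
  | cons v rest => simp [zip_replicate_false]
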